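-- pv_equiv track=rewrite | github.com/HotShot003/Data-Structure-Practice-Questions | Step1-Learn The Basics/Number Logics/NumberLogics35.py | range_StrongNumber
-- ===== SOURCE A (Python) =====
-- def factorial(n):
--     f1=1
--     f2=1
--     while n:
--         f1=f1*f2
--         f2+=1
--         n-=1
--     return f1
--
-- def numlen(n):
--     c=0
--     while n:
--         n=n//10
--         c+=1
--     return c
--
-- def range_StrongNumber(s,e):
--     stg=[]
--     for i in range(s,e+1):
--         orgi = i
--         l=numlen(i)
--         sum=0
--
--         while i>0:
--             sum = sum + factorial(i%10)
--             i=i//10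
--
--         if sum == orgi:
--             stg.append(orgi)
--     return stg
-- ===== SOURCE B (Python) =====
-- _FACT = (1, 1, 2, 6, 24, 120, 720, 5040, 40320, 362880)
--
-- def _digit_fact_sum(i):
--     return 0 if i <= 0 else _FACT[i % 10] + _digit_fact_sum(i // 10)
--
-- def range_StrongNumber(s, e):
--     return [i for i in range(s, e + 1) if _digit_fact_sum(i) == i]
-- ===== Notes on version B (the rewrite author's own statement) =====
-- stated objective: faster
-- what changed: B replaces A's per-digit from-scratch factorial loop with a precomputed 0..9 factorial table and a recursive digit-factorial sum, drops A's dead numlen pass, and builds the result as a comprehension instead of an append-accumulator loop.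
import Mathlib
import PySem

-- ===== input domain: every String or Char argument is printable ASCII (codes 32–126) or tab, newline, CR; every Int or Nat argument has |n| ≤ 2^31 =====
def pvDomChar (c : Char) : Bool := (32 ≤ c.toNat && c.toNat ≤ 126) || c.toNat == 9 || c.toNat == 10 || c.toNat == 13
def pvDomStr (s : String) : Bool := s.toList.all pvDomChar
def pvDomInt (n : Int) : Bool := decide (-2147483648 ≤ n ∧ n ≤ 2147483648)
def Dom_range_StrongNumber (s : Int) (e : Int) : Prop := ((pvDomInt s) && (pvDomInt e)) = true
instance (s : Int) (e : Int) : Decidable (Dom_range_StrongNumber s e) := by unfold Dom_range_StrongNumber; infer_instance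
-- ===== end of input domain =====

-- B replaces A's per-digit from-scratch factorial loop with a precomputed 0..9 factorial
-- table and a recursive digit-factorial sum (A's dead `numlen` pass disappears too), intended
-- as a constant-factor speed-up. The Lean ports agree on all inputs; note the Python A itself
-- never returns on a range containing a negative number (numlen diverges there), while B
-- returns — equivalence is about inputs where A returns.

-- ===== PORT A =====
-- factorial: `while n: f1=f1*f2; f2+=1; n-=1`; A only calls it with n = i%10 ≥ 0
-- (Python diverges for n<0), so recursion on n.toNat is exact on every reached call.
def factAgo : Nat → Int → Int → Int
  | 0, f1, _ => f1
  | Nat.succ k, f1, f2 => factAgo k (f1 * f2) (f2 + 1)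

def factorialA (n : Int) : Int := factAgo n.toNat 1 1

-- numlen: `while n: n = n//10; c += 1`. For n < 0 the Python loop never terminates
-- (n//10 stabilises at -1), so nothing is claimed about its value there; the port stops.
def numlenGo (n : Int) (c : Int) : Int :=
  if h : 0 < n then numlenGo (PySem.Int.floordiv n 10) (c + 1) else c
termination_by n.toNat
decreasing_by
  have h10 : PySem.Int.floordiv n 10 = n / 10 := PySem.Int.floordiv_eq_ediv_of_pos (by norm_num)
  rw [h10]; omega

def numlenA (n : Int) : Int := numlenGo n 0

-- the inner loop: `while i>0: sum = sum + factorial(i%10); i = i//10`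
def sumGo (i : Int) (sum : Int) : Int :=
  if h : 0 < i then sumGo (PySem.Int.floordiv i 10) (sum + factorialA (PySem.Int.mod i 10)) else sum
termination_by i.toNat
decreasing_by
  have h10 : PySem.Int.floordiv i 10 = i / 10 := PySem.Int.floordiv_eq_ediv_of_pos (by norm_num)
  rw [h10]; omega

def range_StrongNumber (s : Int) (e : Int) : List Int :=
  (PySem.List.pyRange s (e + 1) 1).foldl
    (fun stg i =>
      let orgi := i
      let _l := numlenA i          -- A computes l = numlen(i) and never uses it
      let sum := sumGo i 0
      if sum = orgi then stg ++ [orgi] else stg)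
    []

-- ===== PORT B =====
def factTable : List Int := [1, 1, 2, 6, 24, 120, 720, 5040, 40320, 362880]

-- _FACT[i % 10]: the index is always in 0..9 when i > 0, so pyGet? is always some
-- (the .getD 0 default is never used).
def digitFactSum (i : Int) : Int :=
  if h : i ≤ 0 then 0
  else (PySem.List.pyGet? factTable (PySem.Int.mod i 10)).getD 0
       + digitFactSum (PySem.Int.floordiv i 10)
termination_by i.toNat
decreasing_by
  have h10 : PySem.Int.floordiv i 10 = i / 10 := PySem.Int.floordiv_eq_ediv_of_pos (by norm_num)
  rw [h10]; omega

def range_StrongNumber_alt (s : Int) (e : Int) : List Int :=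
  (PySem.List.pyRange s (e + 1) 1).filter (fun i => digitFactSum i == i)

-- ===== PRECONDITION & SPEC =====
def Spec_range_StrongNumber (s : Int) (e : Int) (out : List Int) : Prop := out = range_StrongNumber_alt s e
instance (s : Int) (e : Int) (out : List Int) : Decidable (Spec_range_StrongNumber s e out) := by
  unfold Spec_range_StrongNumber; infer_instance

-- ===== CLAIM (what is proved, stated in full; the proofs are below) =====
def Claim_equal_range_StrongNumber : Prop := ∀ (s : Int) (e : Int), Dom_range_StrongNumber s e → Spec_range_StrongNumber s e (range_StrongNumber s e)

-- ===== LEMMAS AND PROOFS =====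

-- A's from-scratch factorial agrees with B's table on the only reachable digits 0..9.
theorem factorialA_eq_table (d : Int) (h0 : 0 ≤ d) (h10 : d < 10) :
    factorialA d = (PySem.List.pyGet? factTable d).getD 0 := by
  interval_cases d <;> decide

-- A's inner accumulation loop computes acc + B's recursive digit-factorial sum.
theorem sumGo_eq_digitFactSum : ∀ (n : Nat) (i : Int), i.toNat ≤ n → ∀ (acc : Int),
    sumGo i acc = acc + digitFactSum i := by
  intro n
  induction n with
  | zero =>
    intro i h acc
    have hle : i ≤ 0 := by omega
    rw [sumGo, digitFactSum, dif_neg (by omega : ¬ 0 < i), dif_pos hle]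
    omega
  | succ n ih =>
    intro i h acc
    by_cases hp : 0 < i
    · rw [sumGo, digitFactSum, dif_pos hp, dif_neg (by omega : ¬ i ≤ 0)]
      have hfd : PySem.Int.floordiv i 10 = i / 10 :=
        PySem.Int.floordiv_eq_ediv_of_pos (by norm_num)
      have hrec : (PySem.Int.floordiv i 10).toNat ≤ n := by rw [hfd]; omega
      rw [ih _ hrec]
      have hm0 : 0 ≤ PySem.Int.mod i 10 := PySem.Int.mod_nonneg i (by norm_num)
      have hm10 : PySem.Int.mod i 10 < 10 := PySem.Int.mod_lt i (by norm_num)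
      rw [factorialA_eq_table _ hm0 hm10]
      ring
    · rw [sumGo, digitFactSum, dif_neg hp, dif_pos (by omega : i ≤ 0)]
      omega

theorem sumGo_zero (i : Int) : sumGo i 0 = digitFactSum i := by
  have := sumGo_eq_digitFactSum i.toNat i le_rfl 0
  omega

-- A's append-accumulator loop is a filter of the traversed list.
theorem foldlA_eq_filter : ∀ (l : List Int) (acc : List Int),
    l.foldl
      (fun stg i =>
        let orgi := i
        let _l := numlenA i
        let sum := sumGo i 0
        if sum = orgi then stg ++ [orgi] else stg)
      acc = acc ++ l.filter (fun i => digitFactSum i == i) := by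
  intro l
  induction l with
  | nil => intro acc; simp
  | cons x xs ih =>
    intro acc
    simp only [List.foldl_cons, List.filter_cons]
    rw [ih, sumGo_zero]
    by_cases h : digitFactSum x = x
    · simp [h, List.append_assoc]
    · simp [h]

-- ===== VERDICT (by name: the statement is the Claim_ definition above) =====
theorem range_StrongNumber_spec : Claim_equal_range_StrongNumber := by
  intro s e _
  unfold Spec_range_StrongNumber range_StrongNumber range_StrongNumber_alt
  rw [foldlA_eq_filter]
  simp
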